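-- pv_equiv track=rewrite | github.com/YYYYXL1004/TIGER | data/process.py | group_user_items
-- ===== SOURCE A (Python) =====
-- def group_user_items(userIDs, itemIDs, timestamps):
--     user_item_mapping = {}
--     for userID, itemID, timestamp in zip(userIDs, itemIDs, timestamps):
--         if userID not in user_item_mapping:
--             user_item_mapping[userID] = []
--         user_item_mapping[userID].append((itemID, timestamp))
--     for userID in user_item_mapping:
--         user_item_mapping[userID].sort(key=lambda x: x[1])
--         user_item_mapping[userID] = [item[0] for item in user_item_mapping[userID]]
--     return user_item_mapping
-- ===== SOURCE B (Python) =====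
-- def group_user_items(userIDs, itemIDs, timestamps):
--     records = list(zip(userIDs, itemIDs, timestamps))
--     out = {u: [] for u, _, _ in records}
--     for u, i, _ in sorted(records, key=lambda r: r[2]):
--         out[u].append(i)
--     return out
-- ===== Notes on version B (the rewrite author's own statement) =====
-- stated objective: alternative
-- what changed: Replaces A's N per-user timestamp sorts with one stable global sort of all (user,item,timestamp) records keyed on timestamp only, after pre-registering every user key in input order, then a single grouping pass appending items.
import Mathlib
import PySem

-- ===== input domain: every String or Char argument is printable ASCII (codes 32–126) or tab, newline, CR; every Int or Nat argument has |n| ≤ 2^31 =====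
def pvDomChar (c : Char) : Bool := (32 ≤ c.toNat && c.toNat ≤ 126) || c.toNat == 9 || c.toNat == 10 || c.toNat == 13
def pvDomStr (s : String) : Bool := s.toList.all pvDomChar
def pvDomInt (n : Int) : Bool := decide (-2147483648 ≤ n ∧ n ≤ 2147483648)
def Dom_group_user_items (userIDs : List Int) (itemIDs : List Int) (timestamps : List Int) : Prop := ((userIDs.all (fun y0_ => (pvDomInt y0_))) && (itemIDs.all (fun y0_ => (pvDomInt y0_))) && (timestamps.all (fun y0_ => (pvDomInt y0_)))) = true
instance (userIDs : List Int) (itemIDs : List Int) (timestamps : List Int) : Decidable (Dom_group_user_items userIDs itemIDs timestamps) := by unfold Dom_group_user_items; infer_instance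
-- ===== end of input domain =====

-- B replaces A's per-user timestamp sorts by ONE stable global sort by timestamp followed by a
-- single grouping pass into pre-registered keys (objective: alternative decomposition).

-- ===== PORT A =====
-- per-record loop: 'if userID not in d: d[userID] = []' then 'd[userID].append((itemID, timestamp))';
-- the second Python loop replaces each value independently, ported as a map over the items.
def group_user_items (userIDs : List Int) (itemIDs : List Int) (timestamps : List Int) : List (Int × List Int) :=
  let recs := userIDs.zip (itemIDs.zip timestamps)
  let d := recs.foldl (fun d r =>
    let d := if d.contains r.1 then d else d.insert r.1 ([] : List (Int × Int))
    d.insert r.1 (d.getD r.1 [] ++ [r.2])) PySem.Dict.empty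
  d.items.map (fun p => (p.1, (PySem.List.sorted p.2 (fun x => x.2) false).map (fun x => x.1)))

-- ===== PORT B =====
-- 1) dict comprehension registering every user with [];  2) one stable sort of all records by
-- timestamp;  3) one pass appending each itemID to its user's list.
def group_user_items_alt (userIDs : List Int) (itemIDs : List Int) (timestamps : List Int) : List (Int × List Int) :=
  let recs := userIDs.zip (itemIDs.zip timestamps)
  let d0 := recs.foldl (fun d r => d.insert r.1 ([] : List Int)) PySem.Dict.empty
  let d := (PySem.List.sorted recs (fun r => r.2.2) false).foldl
    (fun d r => d.insert r.1 (d.getD r.1 [] ++ [r.2.1])) d0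
  d.items

-- ===== PRECONDITION & SPEC =====
def Spec_group_user_items (userIDs : List Int) (itemIDs : List Int) (timestamps : List Int) (out : List (Int × List Int)) : Prop := out = group_user_items_alt userIDs itemIDs timestamps
instance (userIDs : List Int) (itemIDs : List Int) (timestamps : List Int) (out : List (Int × List Int)) : Decidable (Spec_group_user_items userIDs itemIDs timestamps out) := by unfold Spec_group_user_items; infer_instance

-- ===== CLAIM (what is proved, stated in full; the proofs are below) =====
def Claim_equal_group_user_items : Prop := ∀ (userIDs : List Int) (itemIDs : List Int) (timestamps : List Int), Dom_group_user_items userIDs itemIDs timestamps → Spec_group_user_items userIDs itemIDs timestamps (group_user_items userIDs itemIDs timestamps)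

-- ===== LEMMAS AND PROOFS =====

theorem stepA_eq_modify (d : PySem.Dict Int (List (Int × Int))) (r : Int × Int × Int) :
    ((if d.contains r.1 then d else d.insert r.1 ([] : List (Int × Int))).insert r.1
      ((if d.contains r.1 then d else d.insert r.1 ([] : List (Int × Int))).getD r.1 [] ++ [r.2]))
    = d.modify r.1 [] (fun v => v ++ [r.2]) := by
  by_cases h : d.contains r.1 = true
  · simp [h, PySem.Dict.modify]
  · simp only [Bool.not_eq_true] at h
    simp only [h, Bool.false_eq_true, if_false, PySem.Dict.modify,
      PySem.Dict.getD_insert_self, PySem.Dict.insert_insert_self,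
      PySem.Dict.getD_of_not_contains d [] h, List.nil_append]

-- getD of the key-registration fold is always [].
theorem getD_regfold (l : List (Int × Int × Int)) (d : PySem.Dict Int (List Int)) (c : Int)
    (h : d.getD c [] = []) :
    (l.foldl (fun d r => d.insert r.1 ([] : List Int)) d).getD c [] = [] := by
  induction l generalizing d with
  | nil => simpa using h
  | cons r l ih =>
    simp only [List.foldl_cons]
    apply ih
    rw [PySem.Dict.getD_insert]
    split_ifs <;> simp [h]

theorem insertBy_eq_cons {α : Type} (bef : α → α → Bool) (x : α) (l : List α)
    (h : ∀ z ∈ l, bef x z = true) : PySem.List.insertBy bef x l = x :: l := by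
  cases l with
  | nil => rfl
  | cons y ys => simp [PySem.List.insertBy, h y (by simp)]

theorem filter_insertBy {α κ : Type} [LinearOrder κ] (key : α → κ) (p : α → Bool) (x : α)
    (ys : List α) (hys : ys.Pairwise (fun a b => key a ≤ key b)) :
    (PySem.List.insertBy (fun a b => decide (key a < key b)) x ys).filter p =
      if p x then PySem.List.insertBy (fun a b => decide (key a < key b)) x (ys.filter p)
      else ys.filter p := by
  induction ys with
  | nil => by_cases hx : p x = true <;> simp [PySem.List.insertBy, hx]
  | cons y ys ih =>
    rcases List.pairwise_cons.mp hys with ⟨hy, htl⟩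
    by_cases hxy : key x < key y
    · by_cases hx : p x = true
      · by_cases hpy : p y = true
        · simp [PySem.List.insertBy, hxy, hx, hpy]
        · have hcons : PySem.List.insertBy (fun a b => decide (key a < key b)) x (List.filter p ys)
              = x :: List.filter p ys := by
            apply insertBy_eq_cons
            intro z hz
            have hz' := List.mem_of_mem_filter hz
            simp [lt_of_lt_of_le hxy (hy z hz')]
          simp [PySem.List.insertBy, hxy, hx, hpy, hcons]
      · simp [PySem.List.insertBy, hxy, hx]
    · have ih' := ih htl
      by_cases hx : p x = true
      · by_cases hpy : p y = true
        · simp [PySem.List.insertBy, hxy, hx, hpy, ih']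
        · simp [PySem.List.insertBy, hxy, hx, hpy, ih']
      · by_cases hpy : p y = true
        · simp [PySem.List.insertBy, hxy, hx, hpy, ih']
        · simp [PySem.List.insertBy, hxy, hx, hpy, ih']

theorem sorted_append_singleton {α κ : Type} [LinearOrder κ] (key : α → κ) (l : List α) (x : α) :
    PySem.List.sorted (l ++ [x]) key false =
      PySem.List.insertBy (fun a b => decide (key a < key b)) x (PySem.List.sorted l key false) := by
  rw [PySem.List.sorted_eq_foldl_insertBy, PySem.List.sorted_eq_foldl_insertBy, List.foldl_append]
  rfl

theorem sorted_filter {α κ : Type} [LinearOrder κ] (key : α → κ) (p : α → Bool) (l : List α) :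
    (PySem.List.sorted l key false).filter p = PySem.List.sorted (l.filter p) key false := by
  induction l using List.reverseRecOn with
  | nil => rfl
  | append_singleton l x ih =>
    rw [sorted_append_singleton,
      filter_insertBy key p x _ (PySem.List.sorted_pairwise l key), ih, List.filter_append]
    by_cases hx : p x = true
    · simp [hx, sorted_append_singleton]
    · simp [hx]

theorem map_insertBy {α β κ : Type} [LinearOrder κ] (key : β → κ) (g : α → β) (x : α) (ys : List α) :
    (PySem.List.insertBy (fun a b => decide (key (g a) < key (g b))) x ys).map g =
      PySem.List.insertBy (fun a b => decide (key a < key b)) (g x) (ys.map g) := by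
  induction ys with
  | nil => rfl
  | cons y ys ih =>
    by_cases h : key (g x) < key (g y)
    · simp [PySem.List.insertBy, h]
    · simp [PySem.List.insertBy, h, ih]

theorem sorted_map {α β κ : Type} [LinearOrder κ] (key : β → κ) (g : α → β) (l : List α) :
    PySem.List.sorted (l.map g) key false = (PySem.List.sorted l (fun a => key (g a)) false).map g := by
  induction l using List.reverseRecOn with
  | nil => rfl
  | append_singleton l x ih =>
    rw [List.map_append, List.map_singleton, sorted_append_singleton, sorted_append_singleton,
      map_insertBy, ih]

theorem ports_eq (userIDs itemIDs timestamps : List Int) :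
    group_user_items userIDs itemIDs timestamps = group_user_items_alt userIDs itemIDs timestamps := by
  simp only [group_user_items, group_user_items_alt]
  rw [show (fun (d : PySem.Dict Int (List (Int × Int))) (r : Int × Int × Int) =>
        (if d.contains r.1 then d else d.insert r.1 ([] : List (Int × Int))).insert r.1
          ((if d.contains r.1 then d else d.insert r.1 ([] : List (Int × Int))).getD r.1 [] ++ [r.2]))
      = fun d r => d.modify r.1 [] (fun v => v ++ [r.2]) from
      funext fun d => funext fun r => stepA_eq_modify d r]
  set recs := userIDs.zip (itemIDs.zip timestamps) with hrecs
  set dA := recs.foldl (fun d r => d.modify r.1 [] (fun v => v ++ [r.2])) PySem.Dict.empty with hdA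
  set d0 := recs.foldl (fun d r => d.insert r.1 ([] : List Int)) PySem.Dict.empty with hd0
  set srt := PySem.List.sorted recs (fun r => r.2.2) false with hsrt
  set dB := srt.foldl (fun d r => d.insert r.1 (d.getD r.1 [] ++ [r.2.1])) d0 with hdB
  -- keys
  have hkA : dA.keys = PySem.Set.ofList (recs.map (fun r => r.1)) := by
    rw [hdA, PySem.Dict.keys_foldl_modify_key recs (fun r => r.1) [] (fun d r v => v ++ [r.2])]
    simp [PySem.Set.update_nil_left]
  have hnA : dA.keys.Nodup := by
    rw [hdA]
    exact PySem.Dict.nodup_keys_foldl_modify_key recs (fun r => r.1) [] (fun d r v => v ++ [r.2])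
      PySem.Dict.empty (by simp)
  have hgA : ∀ c, dA.getD c [] = (recs.filter (fun r => r.1 == c)).map (fun r => r.2) := by
    intro c
    rw [hdA, PySem.Dict.getD_foldl_modify_append recs PySem.Dict.empty c]
    simp
  have hk0 : d0.keys = PySem.Set.ofList (recs.map (fun r => r.1)) := by
    rw [hd0, PySem.Dict.keys_foldl_insert_key recs (fun r => r.1) (fun _ _ => ([] : List Int))]
    simp [PySem.Set.update_nil_left]
  have hn0 : d0.keys.Nodup := by
    rw [hk0]; exact PySem.Set.nodup_ofList _
  -- B's append step is Dict.modify, and the fold over triples is a fold over (user, item) pairs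
  have hdB' : dB = (srt.map (fun r => (r.1, r.2.1))).foldl
      (fun d p => d.modify p.1 [] (fun v => v ++ [p.2])) d0 := by
    rw [hdB, List.foldl_map]
    rfl
  have hkB : dB.keys = d0.keys := by
    rw [hdB', PySem.Dict.keys_foldl_modify_key (srt.map (fun r => (r.1, r.2.1))) (fun (p : Int × Int) => p.1) [] (fun d p v => v ++ [p.2]) d0]
    rw [PySem.Set.update_eq_append_filter]
    have : ∀ y ∈ PySem.Set.ofList ((srt.map (fun r => (r.1, r.2.1))).map (fun p => p.1)),
        d0.keys.contains y = true := by
      intro y hy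
      rw [PySem.Set.mem_ofList] at hy
      simp only [List.map_map, List.mem_map] at hy
      obtain ⟨r, hr, rfl⟩ := hy
      have hrrec : r ∈ recs := (PySem.List.sorted_perm recs (fun r => r.2.2) false).mem_iff.mp hr
      show d0.keys.contains r.1 = true
      have hm : r.1 ∈ d0.keys := by
        rw [hk0, PySem.Set.mem_ofList]; exact List.mem_map_of_mem hrrec
      simpa [PySem.Set.contains_iff] using hm
    rw [List.filter_eq_nil_iff.mpr (by intro y hy; have h2 := this y hy; simpa [PySem.Set.contains_iff] using h2)]
    simp
  have hnB : dB.keys.Nodup := by rw [hkB]; exact hn0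
  have hgB : ∀ c, dB.getD c [] = (srt.filter (fun r => r.1 == c)).map (fun r => r.2.1) := by
    intro c
    rw [hdB', PySem.Dict.getD_foldl_modify_append (srt.map (fun r => (r.1, r.2.1))) d0 c]
    rw [getD_regfold recs PySem.Dict.empty c (by simp)]
    rw [List.filter_map, List.map_map]
    rfl
  rw [PySem.Dict.items_eq_map_keys dA hnA [], PySem.Dict.items_eq_map_keys dB hnB [],
    hkB, hk0, hkA, List.map_map]
  apply List.map_congr_left
  intro k _
  simp only [Function.comp]
  rw [hgA k, hgB k]
  refine congrArg (fun l => (k, l)) ?_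
  rw [hsrt, sorted_filter (fun r : Int × Int × Int => r.2.2) (fun r => r.1 == k) recs,
    sorted_map (fun x : Int × Int => x.2) (fun r : Int × Int × Int => r.2)
      (recs.filter (fun r => r.1 == k)), List.map_map]
  rfl

-- ===== VERDICT (by name: the statement is the Claim_ definition above) =====
theorem group_user_items_spec : Claim_equal_group_user_items := by
  intro userIDs itemIDs timestamps _
  unfold Spec_group_user_items
  exact ports_eq userIDs itemIDs timestamps
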